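-- pv_equiv track=rewrite | github.com/pyrustic/pyrustic | pyrustic/pymisc.py | tab_to_space
-- ===== SOURCE A (Python) =====
-- def tab_to_space(text, tab_size=4):
--     TAB = "\t"
--     SPACE = " "
--     lines = text.split("\n")
--     results = []
--     for line in lines:
--         cache = str()
--         for char in line:
--             if char == TAB:
--                 while len(cache) % tab_size != 0:
--                     cache += SPACE
--             else:
--                 cache += char
--         results.append(cache)
--     return "\n".join(results)
-- ===== SOURCE B (Python) =====
-- def tab_to_space(text, tab_size=4):
--     # Single pass over the whole text: track the current column, emit each
--     # tab as "(-col) % step" spaces in one step, reset the column at "\n".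
--     step = abs(tab_size)
--     out = []
--     col = 0
--     for ch in text:
--         if ch == "\n":
--             out.append(ch)
--             col = 0
--         elif ch == "\t":
--             pad = -col % step
--             out.append(" " * pad)
--             col += pad
--         else:
--             out.append(ch)
--             col += 1
--     return "".join(out)
-- ===== Notes on version B (the rewrite author's own statement) =====
-- stated objective: alternative
-- what changed: Replaces the split-into-lines structure with a per-tab character-by-character padding while-loop and string concatenation by a single pass over the whole text that tracks the current column, emits each tab's padding as one computed space block of size (-col) mod step, resets the column at newlines, and joins collected chunks once.
import Mathlib
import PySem

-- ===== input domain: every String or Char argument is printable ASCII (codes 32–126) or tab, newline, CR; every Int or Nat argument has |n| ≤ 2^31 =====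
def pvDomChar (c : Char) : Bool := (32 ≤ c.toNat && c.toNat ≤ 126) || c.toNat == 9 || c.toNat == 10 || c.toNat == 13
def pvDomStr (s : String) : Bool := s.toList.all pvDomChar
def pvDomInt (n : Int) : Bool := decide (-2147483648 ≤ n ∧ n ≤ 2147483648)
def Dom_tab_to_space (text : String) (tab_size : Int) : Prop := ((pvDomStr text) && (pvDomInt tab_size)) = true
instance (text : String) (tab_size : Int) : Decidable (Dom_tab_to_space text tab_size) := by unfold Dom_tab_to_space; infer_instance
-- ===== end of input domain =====

-- B replaces A's split-into-lines loop with a per-tab while-padding and quadratic `+=` by one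
-- pass over the text that tracks the column and emits each tab's padding in one block.

-- ===== PORT A =====
-- the `while len(cache) % tab_size != 0: cache += " "` loop; fuel tab_size.natAbs suffices for
-- tab_size ≠ 0 (Pre_): each step grows cache by one and the condition fails within |tab_size| steps.
def pvPadWhile (tab_size : Int) (fuel : Nat) (cache : List Char) : List Char :=
  match fuel with
  | 0 => cache
  | fuel + 1 =>
      if PySem.Int.mod (cache.length : Int) tab_size ≠ 0 then
        pvPadWhile tab_size fuel (cache ++ [' '])
      else cache

def pvAStep (tab_size : Int) (cache : List Char) (ch : Char) : List Char :=
  if ch = '\t' then pvPadWhile tab_size tab_size.natAbs cache else cache ++ [ch]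

def pvALine (tab_size : Int) (line : List Char) : List Char :=
  line.foldl (pvAStep tab_size) []

def tab_to_space (text : String) (tab_size : Int) : String :=
  let lines := PySem.Chars.splitOn text.toList ['\n']
  String.ofList (PySem.Chars.join ['\n'] (lines.map (pvALine tab_size)))

-- ===== PORT B =====
def pvBStep (step : Int) (st : List (List Char) × Int) (ch : Char) : List (List Char) × Int :=
  if ch = '\n' then (st.1 ++ [[ch]], 0)
  else if ch = '\t' then
    let pad := PySem.Int.mod (-st.2) step
    (st.1 ++ [List.replicate pad.toNat ' '], st.2 + pad)
  else (st.1 ++ [[ch]], st.2 + 1)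

def tab_to_space_alt (text : String) (tab_size : Int) : String :=
  let st := text.toList.foldl (pvBStep |tab_size|) ([], 0)
  String.ofList (PySem.Chars.join [] st.1)

-- ===== PRECONDITION & SPEC =====
-- A raises ZeroDivisionError exactly when tab_size = 0 AND text contains a tab (len(cache) % 0
-- is only evaluated at a tab); B raises there too ((-col) % 0 at a tab).
def Pre_tab_to_space (text : String) (tab_size : Int) : Prop := tab_size ≠ 0 ∨ '\t' ∉ text.toList
instance (text : String) (tab_size : Int) : Decidable (Pre_tab_to_space text tab_size) := by unfold Pre_tab_to_space; infer_instance
def pvWitness_tab_to_space : String × Int := ("a\tbc\t\nx", 4)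

def Spec_tab_to_space (text : String) (tab_size : Int) (out : String) : Prop := out = tab_to_space_alt text tab_size
instance (text : String) (tab_size : Int) (out : String) : Decidable (Spec_tab_to_space text tab_size out) := by unfold Spec_tab_to_space; infer_instance

-- ===== CLAIM (what is proved, stated in full; the proofs are below) =====
def Claim_equal_tab_to_space : Prop := ∀ (text : String) (tab_size : Int), Dom_tab_to_space text tab_size → Pre_tab_to_space text tab_size → Spec_tab_to_space text tab_size (tab_to_space text tab_size)

-- ===== LEMMAS AND PROOFS =====

-- common specification of the result: one pass over the text with the current column
def pvSpec (step : Int) (col : Int) : List Char → List Char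
  | [] => []
  | ch :: cs =>
      if ch = '\n' then '\n' :: pvSpec step 0 cs
      else if ch = '\t' then
        List.replicate (PySem.Int.mod (-col) step).toNat ' ' ++
          pvSpec step (col + PySem.Int.mod (-col) step) cs
      else ch :: pvSpec step (col + 1) cs

-- recursive shape of splitting on '\n'
def pvSplit : List Char → List (List Char)
  | [] => [[]]
  | c :: cs =>
      if c = '\n' then [] :: pvSplit cs
      else
        match pvSplit cs with
        | l :: ls => (c :: l) :: ls
        | [] => [[c]]

theorem pvSplit_ne_nil (cs : List Char) : pvSplit cs ≠ [] := by
  induction cs with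
  | nil => simp [pvSplit]
  | cons c cs ih =>
    simp only [pvSplit]
    split_ifs
    · simp
    · cases h : pvSplit cs <;> simp

theorem pvGo_spec (fuel : Nat) : ∀ (l cur : List Char) (accs : List (List Char)),
    l.length < fuel →
    PySem.Chars.splitOn.go ['\n'] fuel l cur accs =
      accs.reverse ++
        (match pvSplit l with
         | p :: ps => (cur.reverse ++ p) :: ps
         | [] => []) := by
  induction fuel with
  | zero => intro l cur accs h; omega
  | succ fuel ih =>
    intro l cur accs h
    match l with
    | [] => simp [PySem.Chars.splitOn.go, pvSplit]
    | c :: rest =>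
      rw [PySem.Chars.splitOn.go]
      by_cases hc : c = '\n'
      · subst hc
        have hp : List.isPrefixOf ['\n'] ('\n' :: rest) = true := by simp [List.isPrefixOf]
        simp only [hp, if_pos]
        simp only [List.length_singleton, List.drop_succ_cons, List.drop_zero]
        rw [ih rest [] (List.reverse cur :: accs) (by simpa using Nat.lt_of_succ_lt_succ h)]
        simp only [pvSplit, reduceIte]
        cases hs : pvSplit rest with
        | nil => exact absurd hs (pvSplit_ne_nil rest)
        | cons p ps => simp
      · have hp : List.isPrefixOf ['\n'] (c :: rest) = false := by
          simp [List.isPrefixOf]; intro hh; exact absurd hh.symm hc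
        simp only [hp, Bool.false_eq_true, if_false]
        rw [ih rest (c :: cur) accs (by simpa using Nat.lt_of_succ_lt_succ h)]
        simp only [pvSplit, if_neg hc]
        cases hs : pvSplit rest with
        | nil => exact absurd hs (pvSplit_ne_nil rest)
        | cons p ps => simp

theorem pvSplitOn_eq (cs : List Char) : PySem.Chars.splitOn cs ['\n'] = pvSplit cs := by
  rw [PySem.Chars.splitOn, pvGo_spec (cs.length + 1) cs [] [] (by omega)]
  cases hs : pvSplit cs with
  | nil => exact absurd hs (pvSplit_ne_nil cs)
  | cons p ps => simp

theorem pvMod_abs_zero_iff (n t : Int) :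
    PySem.Int.mod n t = 0 ↔ PySem.Int.mod (-n) |t| = 0 := by
  rw [PySem.Int.mod_eq_zero_iff_dvd, PySem.Int.mod_eq_zero_iff_dvd]
  constructor
  · intro hd; exact (abs_dvd t (-n)).mpr hd.neg_right
  · intro hd; have := (abs_dvd t (-n)).mp hd; simpa using this.neg_right

theorem pvMod_pred (n s : Int) (hs : 0 < s) (h : PySem.Int.mod n s ≠ 0) :
    PySem.Int.mod (n - 1) s = PySem.Int.mod n s - 1 := by
  have h' : n % s ≠ 0 := by rwa [PySem.Int.mod_eq_emod_of_pos hs] at h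
  rw [PySem.Int.mod_eq_emod_of_pos hs, PySem.Int.mod_eq_emod_of_pos hs]
  have h1 : 0 ≤ n % s := Int.emod_nonneg n (by omega)
  have h2 : n % s < s := Int.emod_lt_of_pos n hs
  have hs1 : 1 < s := by
    by_contra hc
    have : s = 1 := by omega
    subst this
    simp at h'
  rw [Int.sub_emod, Int.emod_eq_of_lt (by omega) hs1, Int.emod_eq_of_lt (by omega) (by omega)]

theorem pvPadWhile_eq (tab_size : Int) (h : tab_size ≠ 0) (cache : List Char) :
    pvPadWhile tab_size tab_size.natAbs cache =
      cache ++ List.replicate (PySem.Int.mod (-(cache.length : Int)) |tab_size|).toNat ' ' := by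
  have habs : (0:Int) < |tab_size| := abs_pos.mpr h
  have main : ∀ (fuel : Nat) (cache : List Char),
      (PySem.Int.mod (-(cache.length : Int)) |tab_size|).toNat ≤ fuel →
      pvPadWhile tab_size fuel cache =
        cache ++ List.replicate (PySem.Int.mod (-(cache.length : Int)) |tab_size|).toNat ' ' := by
    intro fuel
    induction fuel with
    | zero =>
      intro cache hle
      have h0 : (PySem.Int.mod (-(cache.length : Int)) |tab_size|).toNat = 0 := Nat.le_zero.mp hle
      simp [pvPadWhile, h0]
    | succ fuel ih =>
      intro cache hle
      by_cases hz : PySem.Int.mod (cache.length : Int) tab_size = 0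
      · have h0 : PySem.Int.mod (-(cache.length : Int)) |tab_size| = 0 :=
          (pvMod_abs_zero_iff _ _).mp hz
        simp [pvPadWhile, hz, h0]
      · have hnz : PySem.Int.mod (-(cache.length : Int)) |tab_size| ≠ 0 := by
          intro h0; exact hz ((pvMod_abs_zero_iff _ _).mpr h0)
        have hpos : 0 < PySem.Int.mod (-(cache.length : Int)) |tab_size| := by
          have := PySem.Int.mod_nonneg (-(cache.length : Int)) habs
          omega
        rw [pvPadWhile, if_pos hz]
        have hstep : PySem.Int.mod (-((cache ++ [' ']).length : Int)) |tab_size| =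
            PySem.Int.mod (-(cache.length : Int)) |tab_size| - 1 := by
          have hlen : -(((cache ++ [' ']).length : Int)) = -(cache.length : Int) - 1 := by
            simp
            ring
          rw [hlen, pvMod_pred _ _ habs (by omega)]
        rw [ih (cache ++ [' ']) (by omega)]
        rw [hstep, List.append_assoc]
        congr 1
        obtain ⟨k, hk⟩ : ∃ k, (PySem.Int.mod (-(cache.length : Int)) |tab_size|).toNat = k + 1 :=
          ⟨(PySem.Int.mod (-(cache.length : Int)) |tab_size|).toNat - 1, by omega⟩
        have : (PySem.Int.mod (-(cache.length : Int)) |tab_size| - 1).toNat = k := by omega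
        rw [this, hk, List.replicate_succ]
        simp
  apply main
  have hlt := PySem.Int.mod_lt (-(cache.length : Int)) habs
  have habs' : |tab_size| = (tab_size.natAbs : Int) := Int.abs_eq_natAbs tab_size
  omega

theorem pvJoin_empty_flatten : ∀ xs : List (List Char), PySem.Chars.join [] xs = xs.flatten
  | [] => by simp [PySem.Chars.join_nil]
  | [p] => by simp [PySem.Chars.join_singleton]
  | p :: q :: rest => by
      rw [PySem.Chars.join_cons_cons]
      simp [pvJoin_empty_flatten (q :: rest)]

theorem pvB_main (step : Int) (cs : List Char) : ∀ (K : List (List Char)) (col : Int),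
    (cs.foldl (pvBStep step) (K, col)).1.flatten = K.flatten ++ pvSpec step col cs := by
  induction cs with
  | nil => intro K col; simp [pvSpec]
  | cons c cs ih =>
    intro K col
    simp only [List.foldl_cons, pvBStep, pvSpec]
    by_cases h1 : c = '\n'
    · subst h1; simp only [reduceIte, ih]; simp
    · by_cases h2 : c = '\t'
      · subst h2
        simp only [reduceIte, ih]
        simp
      · simp only [if_neg h1, if_neg h2, ih]
        simp

theorem pvA_main (tab_size : Int) (cs : List Char) : ∀ cache : List Char,
    (tab_size ≠ 0 ∨ '\t' ∉ cs) →
    PySem.Chars.join ['\n']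
      ((match pvSplit cs with
        | l :: ls => (l.foldl (pvAStep tab_size) cache) :: ls.map (pvALine tab_size)
        | [] => []))
      = cache ++ pvSpec |tab_size| (cache.length : Int) cs := by
  induction cs with
  | nil => intro cache _; simp [pvSplit, pvSpec, PySem.Chars.join_singleton]
  | cons c cs ih =>
    intro cache h
    have htail : tab_size ≠ 0 ∨ '\t' ∉ cs := by
      rcases h with h | h
      · exact Or.inl h
      · exact Or.inr (fun hm => h (List.mem_cons_of_mem _ hm))
    by_cases h1 : c = '\n'
    · subst h1
      simp only [pvSplit, reduceIte]
      obtain ⟨l, ls, hls⟩ : ∃ l ls, pvSplit cs = l :: ls := by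
        cases hp : pvSplit cs with
        | nil => exact absurd hp (pvSplit_ne_nil cs)
        | cons l ls => exact ⟨l, ls, rfl⟩
      simp only [hls, List.map_cons, List.foldl_nil]
      rw [PySem.Chars.join_cons_cons]
      have := ih ([] : List Char) htail
      rw [hls] at this
      have hal : pvALine tab_size l = l.foldl (pvAStep tab_size) [] := rfl
      rw [hal, this]
      simp [pvSpec]
    · simp only [pvSplit, if_neg h1]
      obtain ⟨l, ls, hls⟩ : ∃ l ls, pvSplit cs = l :: ls := by
        cases hp : pvSplit cs with
        | nil => exact absurd hp (pvSplit_ne_nil cs)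
        | cons l ls => exact ⟨l, ls, rfl⟩
      simp only [hls, List.foldl_cons]
      have := ih (pvAStep tab_size cache c) htail
      rw [hls] at this
      rw [this]
      by_cases h2 : c = '\t'
      · subst h2
        have hne : tab_size ≠ 0 := by
          rcases h with h | h
          · exact h
          · exact absurd List.mem_cons_self h
        simp only [pvAStep, reduceIte, pvPadWhile_eq tab_size hne cache]
        simp only [pvSpec, if_neg h1, reduceIte]
        have hnn : 0 ≤ PySem.Int.mod (-(cache.length : Int)) |tab_size| :=
          PySem.Int.mod_nonneg _ (abs_pos.mpr hne)
        have hlen : (((cache ++ List.replicate (PySem.Int.mod (-(cache.length : Int)) |tab_size|).toNat ' ').length : Int))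
            = (cache.length : Int) + PySem.Int.mod (-(cache.length : Int)) |tab_size| := by
          simp
          omega
        rw [List.append_assoc, hlen]
      · simp only [pvAStep, if_neg h2]
        simp only [pvSpec, if_neg h1, if_neg h2]
        simp

-- ===== VERDICT (by name: the statement is the Claim_ definition above) =====
theorem tab_to_space_spec : Claim_equal_tab_to_space := by
  intro text tab_size _ hpre
  unfold Spec_tab_to_space
  show String.ofList (PySem.Chars.join ['\n'] ((PySem.Chars.splitOn text.toList ['\n']).map (pvALine tab_size)))
      = String.ofList (PySem.Chars.join [] ((text.toList.foldl (pvBStep |tab_size|) ([], 0)).1))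
  rw [pvSplitOn_eq, pvJoin_empty_flatten, pvB_main]
  obtain ⟨l, ls, hls⟩ : ∃ l ls, pvSplit text.toList = l :: ls := by
    cases hp : pvSplit text.toList with
    | nil => exact absurd hp (pvSplit_ne_nil text.toList)
    | cons l ls => exact ⟨l, ls, rfl⟩
  have hA := pvA_main tab_size text.toList ([] : List Char) hpre
  rw [hls] at hA
  simp only [hls, List.map_cons]
  have hal : pvALine tab_size l = l.foldl (pvAStep tab_size) [] := rfl
  rw [hal, hA]
  simp
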